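-- pv_equiv track=rewrite | github.com/fedepicado/Comparacion-masiva-ADNmt | Comparación masiva ADNmt.py | unique_positions
-- ===== SOURCE A (Python) =====
-- def unique_positions(lst):
--     unique = {}
--     for i, x in enumerate(lst):
--         if x not in unique:
--             unique[x] = [i]
--         else:
--             unique[x].append(i)
--     return [v[0] for k, v in unique.items() if len(v) == 1]
-- ===== SOURCE B (Python) =====
-- def unique_positions(lst):
--     counts = {}
--     for x in lst:
--         counts[x] = counts.get(x, 0) + 1
--     return [i for i, x in enumerate(lst) if counts[x] == 1]
-- ===== Notes on version B (the rewrite author's own statement) =====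
-- stated objective: simpler
-- what changed: Instead of grouping every index into per-value lists in a dict and harvesting singleton lists from the dict items, B counts occurrences in one pass and then filters enumerate(lst) for count-1 elements, relying on first occurrence = only occurrence for the order.
import Mathlib
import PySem

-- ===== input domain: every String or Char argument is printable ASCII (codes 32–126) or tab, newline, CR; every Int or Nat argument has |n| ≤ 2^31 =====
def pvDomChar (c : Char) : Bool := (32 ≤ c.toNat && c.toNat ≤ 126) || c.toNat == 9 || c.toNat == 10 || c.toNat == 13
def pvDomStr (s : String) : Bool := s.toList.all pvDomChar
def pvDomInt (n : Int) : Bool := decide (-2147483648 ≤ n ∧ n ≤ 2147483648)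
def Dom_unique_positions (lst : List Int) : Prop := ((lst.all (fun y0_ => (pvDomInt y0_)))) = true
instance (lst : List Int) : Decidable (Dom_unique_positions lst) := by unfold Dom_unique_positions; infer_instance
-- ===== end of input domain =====

-- B replaces A's dict of per-value index lists (harvested from dict items) by a one-pass
-- occurrence count followed by a filtered pass over enumerate(lst) (objective: simpler).

-- ===== PORT A =====
-- unique = {}; for i, x in enumerate(lst): if x not in unique: unique[x] = [i] else: unique[x].append(i)
-- return [v[0] for k, v in unique.items() if len(v) == 1]
-- (v[0] is ported as pyGetD v 0 0; the filter guarantees len(v) = 1, so the default is never used)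
def unique_positions (lst : List Int) : List Int :=
  let unique : PySem.Dict Int (List Int) :=
    (PySem.List.enumerate lst 0).foldl
      (fun d p =>
        if !(d.contains p.2) then d.insert p.2 [p.1]
        else d.modify p.2 [] (fun v => v ++ [p.1]))
      PySem.Dict.empty
  (unique.items.filter (fun kv => PySem.List.len kv.2 == 1)).map
    (fun kv => PySem.List.pyGetD kv.2 0 0)


-- ===== PORT B =====
-- counts = {}; for x in lst: counts[x] = counts.get(x, 0) + 1
-- return [i for i, x in enumerate(lst) if counts[x] == 1]
-- (counts[x] is ported as getD; every x of the loop is a key of counts, so the default is never used)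
def unique_positions_alt (lst : List Int) : List Int :=
  let counts : PySem.Dict Int Int :=
    lst.foldl (fun d x => d.insert x (d.getD x 0 + 1)) PySem.Dict.empty
  ((PySem.List.enumerate lst 0).filter (fun p => counts.getD p.2 0 == 1)).map
    (fun p => p.1)


-- ===== PRECONDITION & SPEC =====
def Spec_unique_positions (lst : List Int) (out : List Int) : Prop := out = unique_positions_alt lst
instance (lst : List Int) (out : List Int) : Decidable (Spec_unique_positions lst out) := by unfold Spec_unique_positions; infer_instance

-- ===== CLAIM (what is proved, stated in full; the proofs are below) =====
def Claim_equal_unique_positions : Prop := ∀ (lst : List Int), Dom_unique_positions lst → Spec_unique_positions lst (unique_positions lst)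

-- ===== LEMMAS AND PROOFS =====

def idxsOf (lst : List Int) (x : Int) : List Int :=
  ((PySem.List.enumerate lst 0).filter (fun p => p.2 == x)).map (fun p => p.1)
def fIdx (lst : List Int) (x : Int) : Int := PySem.List.pyGetD (idxsOf lst x) 0 0

theorem length_idxsOf (lst : List Int) (x : Int) : (idxsOf lst x).length = lst.count x := by
  unfold idxsOf
  rw [List.length_map, ← List.countP_eq_length_filter, List.count]
  conv_rhs => rw [← PySem.List.map_snd_enumerate lst (0:Int)]
  rw [List.countP_map]
  rfl

theorem mem_idxsOf (lst : List Int) (x j : Int) :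
    j ∈ idxsOf lst x ↔ ∃ k, ∃ _h : k < lst.length, j = (k : Int) ∧ lst[k] = x := by
  unfold idxsOf
  simp only [List.mem_map, List.mem_filter, PySem.List.mem_enumerate_iff]
  constructor
  · rintro ⟨p, ⟨⟨k, hk, rfl⟩, hpx⟩, rfl⟩
    exact ⟨k, hk, by simp, by simpa using hpx⟩
  · rintro ⟨k, hk, rfl, hx⟩
    exact ⟨((k : Int), lst[k]), ⟨⟨k, hk, by simp⟩, by simpa using hx⟩, by simp⟩

theorem pyGetD_zero_cons (a : Int) (t : List Int) : PySem.List.pyGetD (a :: t) 0 0 = a := by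
  simp [PySem.List.pyGetD]

theorem idxsOf_append_singleton (lst : List Int) (y x : Int) :
    idxsOf (lst ++ [y]) x = idxsOf lst x ++ (if y = x then [(lst.length : Int)] else []) := by
  unfold idxsOf
  rw [PySem.List.enumerate_append, List.filter_append, List.map_append]
  congr 1
  simp [PySem.List.enumerate]
  split_ifs with h <;> simp [h]

theorem idxsOf_eq_nil_iff (lst : List Int) (x : Int) : idxsOf lst x = [] ↔ x ∉ lst := by
  rw [← List.length_eq_zero_iff, length_idxsOf, List.count_eq_zero]

theorem fIdx_spec (lst : List Int) (x : Int) (h : x ∈ lst) :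
    ∃ k, ∃ _h : k < lst.length, fIdx lst x = (k : Int) ∧ lst[k] = x := by
  have hne : idxsOf lst x ≠ [] := by rw [ne_eq, idxsOf_eq_nil_iff]; simpa using h
  obtain ⟨a, t, ht⟩ := List.exists_cons_of_ne_nil hne
  have hmem : a ∈ idxsOf lst x := by rw [ht]; exact List.mem_cons_self
  obtain ⟨k, hk, rfl, hx⟩ := (mem_idxsOf lst x a).mp hmem
  exact ⟨k, hk, by rw [fIdx, ht, pyGetD_zero_cons], hx⟩

theorem fIdx_append_of_mem (lst : List Int) (y x : Int) (h : x ∈ lst) :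
    fIdx (lst ++ [y]) x = fIdx lst x := by
  have hne : idxsOf lst x ≠ [] := by rw [ne_eq, idxsOf_eq_nil_iff]; simpa using h
  obtain ⟨a, t, ht⟩ := List.exists_cons_of_ne_nil hne
  rw [fIdx, fIdx, idxsOf_append_singleton, ht]
  simp

theorem pairwise_fIdx (lst : List Int) :
    (PySem.Set.ofList lst).Pairwise (fun a b => fIdx lst a < fIdx lst b) := by
  induction lst using List.reverseRecOn with
  | nil => simp [PySem.Set.ofList]
  | append_singleton l y ih =>
    have hof : PySem.Set.ofList (l ++ [y]) = PySem.Set.add (PySem.Set.ofList l) y := by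
      rw [PySem.Set.ofList_eq_foldl, PySem.Set.ofList_eq_foldl, List.foldl_append]
      rfl
    rw [hof]
    by_cases hy : y ∈ l
    · have hadd : PySem.Set.add (PySem.Set.ofList l) y = PySem.Set.ofList l := by
        simp [PySem.Set.add, PySem.Set.contains, (PySem.Set.mem_ofList l y).mpr hy]
      rw [hadd]
      refine ih.imp_of_mem ?_
      intro a b ha hb hab
      rw [fIdx_append_of_mem l y a ((PySem.Set.mem_ofList l a).mp ha),
          fIdx_append_of_mem l y b ((PySem.Set.mem_ofList l b).mp hb)]
      exact hab
    · have hadd : PySem.Set.add (PySem.Set.ofList l) y = PySem.Set.ofList l ++ [y] := by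
        simp [PySem.Set.add, PySem.Set.contains, hy, PySem.Set.mem_ofList]
      rw [hadd, List.pairwise_append]
      have hfy : fIdx (l ++ [y]) y = (l.length : Int) := by
        have : idxsOf l y = [] := (idxsOf_eq_nil_iff l y).mpr hy
        rw [fIdx, idxsOf_append_singleton, this, if_pos rfl, List.nil_append, pyGetD_zero_cons]
      refine ⟨ih.imp_of_mem ?_, by simp, ?_⟩
      · intro a b ha hb hab
        rw [fIdx_append_of_mem l y a ((PySem.Set.mem_ofList l a).mp ha),
            fIdx_append_of_mem l y b ((PySem.Set.mem_ofList l b).mp hb)]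
        exact hab
      · intro a ha b hb
        have hal : a ∈ l := (PySem.Set.mem_ofList l a).mp ha
        obtain ⟨k, hk, hfa, _⟩ := fIdx_spec l a hal
        rw [List.mem_singleton] at hb
        rw [hb, hfy, fIdx_append_of_mem l y a hal, hfa]
        exact_mod_cast hk

theorem idxsOf_of_count_one (lst : List Int) (x : Int) (h : lst.count x = 1) :
    ∃ k, ∃ _h : k < lst.length, idxsOf lst x = [(k : Int)] ∧ lst[k] = x := by
  have hlen : (idxsOf lst x).length = 1 := by rw [length_idxsOf, h]
  obtain ⟨a, ha⟩ := List.length_eq_one_iff.mp hlen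
  have hmem : a ∈ idxsOf lst x := by rw [ha]; exact List.mem_cons_self
  obtain ⟨k, hk, rfl, hx⟩ := (mem_idxsOf lst x a).mp hmem
  exact ⟨k, hk, ha, hx⟩

theorem unique_positions_alt_eq_form (lst : List Int) :
    unique_positions_alt lst
      = ((PySem.List.enumerate lst 0).filter (fun p => lst.count p.2 == 1)).map (fun p => p.1) := by
  unfold unique_positions_alt
  dsimp only
  congr 1
  apply List.filter_congr
  intro p _
  rw [PySem.Dict.getD_foldl_insert_add_one, PySem.Dict.getD_empty, zero_add]
  simp

theorem unique_positions_eq_form (lst : List Int) :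
    unique_positions lst
      = ((PySem.Set.ofList lst).filter (fun x => lst.count x == 1)).map (fIdx lst) := by
  unfold unique_positions
  dsimp only
  have hstep : (PySem.List.enumerate lst 0).foldl
      (fun d p =>
        if !(d.contains p.2) then d.insert p.2 [p.1]
        else d.modify p.2 [] (fun v => v ++ [p.1]))
      PySem.Dict.empty
    = (PySem.List.enumerate lst 0).foldl
      (fun d p => d.modify p.2 [] (fun v => v ++ [p.1])) PySem.Dict.empty := by
    apply PySem.List.foldl_congr_mem
    intro d p _
    cases hc : d.contains p.2 with
    | false =>
      simp only [Bool.not_false, if_pos]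
      rw [PySem.Dict.modify, PySem.Dict.getD_of_not_contains _ _ hc]
      rfl
    | true => simp
  rw [hstep]
  set D := (PySem.List.enumerate lst 0).foldl
      (fun d p => d.modify p.2 [] (fun v => v ++ [p.1])) PySem.Dict.empty with hD
  have hnodup : D.keys.Nodup := by
    rw [hD]
    exact PySem.Dict.nodup_keys_foldl_modify_key (PySem.List.enumerate lst 0) (fun p => p.2)
      [] (fun d p => fun v => v ++ [p.1]) PySem.Dict.empty (by simp)
  have hkeys : D.keys = PySem.Set.ofList lst := by
    rw [hD, PySem.Dict.keys_foldl_modify_key (PySem.List.enumerate lst 0) (fun p => p.2)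
      [] (fun d p => fun v => v ++ [p.1]) PySem.Dict.empty]
    rw [PySem.Dict.keys_empty, PySem.List.map_snd_enumerate]
    rfl
  have hgetD : ∀ c, D.getD c [] = idxsOf lst c := by
    intro c
    have hswap : D = ((PySem.List.enumerate lst 0).map Prod.swap).foldl
        (fun d q => d.modify q.1 [] (fun v => v ++ [q.2])) PySem.Dict.empty := by
      rw [hD, List.foldl_map]
      rfl
    rw [hswap, PySem.Dict.getD_foldl_modify_append, PySem.Dict.getD_empty, List.nil_append,
        List.filter_map, List.map_map, idxsOf]
    congr 1
  rw [PySem.Dict.items_eq_map_keys D hnodup [], hkeys, List.filter_map, List.map_map]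
  have hpred : ∀ x ∈ PySem.Set.ofList lst,
      ((fun kv : Int × List Int => PySem.List.len kv.2 == 1) ∘ fun k => (k, D.getD k []))  x
        = (lst.count x == 1) := by
    intro x _
    simp only [Function.comp, hgetD x, PySem.List.len]
    rw [← length_idxsOf lst x]
    simp
  rw [List.filter_congr hpred]
  apply List.map_congr_left
  intro x hx
  have hx' : x ∈ PySem.Set.ofList lst := (List.mem_filter.mp hx).1
  simp only [Function.comp, hgetD x]
  rfl

theorem mem_form_A (lst : List Int) (j : Int) :
    j ∈ ((PySem.Set.ofList lst).filter (fun x => lst.count x == 1)).map (fIdx lst)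
      ↔ ∃ k, ∃ _h : k < lst.length, j = (k : Int) ∧ lst.count lst[k] = 1 := by
  simp only [List.mem_map, List.mem_filter, PySem.Set.mem_ofList, beq_iff_eq]
  constructor
  · rintro ⟨x, ⟨hxl, hc⟩, rfl⟩
    obtain ⟨k, hk, hf, hx⟩ := fIdx_spec lst x hxl
    exact ⟨k, hk, hf, by rw [hx]; exact hc⟩
  · rintro ⟨k, hk, rfl, hc⟩
    refine ⟨lst[k], ⟨List.getElem_mem hk, hc⟩, ?_⟩
    obtain ⟨k', hk', hs, hx'⟩ := idxsOf_of_count_one lst lst[k] hc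
    have hmem : (k : Int) ∈ idxsOf lst lst[k] :=
      (mem_idxsOf lst lst[k] (k : Int)).mpr ⟨k, hk, rfl, rfl⟩
    rw [hs, List.mem_singleton] at hmem
    rw [fIdx, hs, pyGetD_zero_cons, ← hmem]

theorem mem_form_B (lst : List Int) (j : Int) :
    j ∈ ((PySem.List.enumerate lst 0).filter (fun p => lst.count p.2 == 1)).map (fun p => p.1)
      ↔ ∃ k, ∃ _h : k < lst.length, j = (k : Int) ∧ lst.count lst[k] = 1 := by
  simp only [List.mem_map, List.mem_filter, PySem.List.mem_enumerate_iff, beq_iff_eq]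
  constructor
  · rintro ⟨p, ⟨⟨k, hk, rfl⟩, hc⟩, rfl⟩
    exact ⟨k, hk, by simp, by simpa using hc⟩
  · rintro ⟨k, hk, rfl, hc⟩
    exact ⟨((k : Int), lst[k]), ⟨⟨k, hk, by simp⟩, hc⟩, by simp⟩

theorem pairwise_form_A (lst : List Int) :
    (((PySem.Set.ofList lst).filter (fun x => lst.count x == 1)).map (fIdx lst)).Pairwise (· < ·) := by
  rw [List.pairwise_map]
  exact (pairwise_fIdx lst).filter _

theorem pairwise_form_B (lst : List Int) :
    (((PySem.List.enumerate lst 0).filter (fun p => lst.count p.2 == 1)).map (fun p => p.1)).Pairwise (· < ·) := by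
  rw [List.pairwise_map]
  exact (PySem.List.pairwise_lt_enumerate lst 0).filter _

theorem unique_positions_eq_alt (lst : List Int) : unique_positions lst = unique_positions_alt lst := by
  rw [unique_positions_eq_form, unique_positions_alt_eq_form]
  set A := ((PySem.Set.ofList lst).filter (fun x => lst.count x == 1)).map (fIdx lst) with hA
  set B := ((PySem.List.enumerate lst 0).filter (fun p => lst.count p.2 == 1)).map (fun p => p.1) with hB
  have hpA : A.Pairwise (· < ·) := pairwise_form_A lst
  have hpB : B.Pairwise (· < ·) := pairwise_form_B lst
  have hperm : A.Perm B := by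
    refine (List.perm_ext_iff_of_nodup ?_ ?_).mpr ?_
    · exact hpA.imp (fun h => ne_of_lt h)
    · exact hpB.imp (fun h => ne_of_lt h)
    · intro j
      rw [hA, hB, mem_form_A, mem_form_B]
  have h1 := PySem.List.sorted_eq_of_perm_of_pairwise_lt B A (fun j => j) hperm hpA
  have h2 := PySem.List.sorted_eq_of_perm_of_pairwise_lt B B (fun j => j) (List.Perm.refl B) hpB
  exact h1.symm.trans h2

-- ===== VERDICT (by name: the statement is the Claim_ definition above) =====
theorem unique_positions_spec : Claim_equal_unique_positions := by
  intro lst _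
  unfold Spec_unique_positions
  exact unique_positions_eq_alt lst
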